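-- pv_equiv track=rewrite | github.com/you-leee/python-practice | Other/String_sameOrder.py | sameOrder
-- ===== SOURCE A (Python) =====
-- def sameOrder(s1, s2):
--     s1_chars = list(s1)
--     s2_chars = list(s2)
--
--     result = []
--     for c in s2_chars:
--         if c in s1_chars:
--             c_count = s1_chars.count(c)
--             result += [c]*c_count
--             for i in range(c_count):
--                 s1_chars.remove(c)
--
--     result += s1_chars
--
--     return ''.join(result)
-- ===== SOURCE B (Python) =====
-- def sameOrder(s1, s2):
--     counts = {}
--     for c in s1:
--         counts[c] = counts.get(c, 0) + 1
--     consumed = set()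
--     out = []
--     for c in s2:
--         if c in counts and c not in consumed:
--             out.extend([c] * counts[c])
--             consumed.add(c)
--     for c in s1:
--         if c not in consumed:
--             out.append(c)
--     return ''.join(out)
-- ===== Notes on version B (the rewrite author's own statement) =====
-- stated objective: faster
-- what changed: Replaces A's repeated in/count/remove scans of a shrinking s1 list by a character-count dict built once plus a consumed set, giving one pass over s2 and one over s1.
import Mathlib
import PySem

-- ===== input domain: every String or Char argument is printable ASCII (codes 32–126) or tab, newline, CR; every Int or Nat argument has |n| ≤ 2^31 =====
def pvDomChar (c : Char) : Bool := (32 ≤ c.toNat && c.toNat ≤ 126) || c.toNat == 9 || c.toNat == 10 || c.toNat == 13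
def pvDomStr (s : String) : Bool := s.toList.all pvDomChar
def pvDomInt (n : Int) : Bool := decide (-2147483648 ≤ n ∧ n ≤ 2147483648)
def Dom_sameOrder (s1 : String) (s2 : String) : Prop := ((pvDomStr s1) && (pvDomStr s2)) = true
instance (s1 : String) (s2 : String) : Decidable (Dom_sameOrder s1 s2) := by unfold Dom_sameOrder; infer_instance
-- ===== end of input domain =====

-- B replaces A's repeated in/count/remove scans of a shrinking s1 list with a
-- count dict built once and a consumed set: one pass over s2 and one over s1 (objective: faster).

-- ===== PORT A =====
-- the body of A's 'for c in s2_chars' loop (result, s1_chars are the state)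
def stepA (st : List Char × List Char) (c : Char) : List Char × List Char :=
  if c ∈ st.2 then
    let c_count := st.2.count c
    (st.1 ++ List.replicate c_count c,
     -- 'for i in range(c_count): s1_chars.remove(c)'; remove? made total via getD;
     -- the element is always present here, so this is exact
     (PySem.List.pyRange 0 (c_count : Int) 1).foldl
       (fun l _ => (PySem.List.remove? l c).getD l) st.2)
  else st

def sameOrder (s1 : String) (s2 : String) : String :=
  let s1_chars := s1.toList
  let s2_chars := s2.toList
  let st := s2_chars.foldl stepA ([], s1_chars)
  String.mk (st.1 ++ st.2)

-- ===== PORT B =====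
-- the body of B's 'for c in s2' loop (out, consumed are the state)
def stepB (counts : PySem.Dict Char Int) (st : List Char × PySem.Set Char) (c : Char) :
    List Char × PySem.Set Char :=
  if counts.contains c && !(PySem.Set.contains st.2 c) then
    (st.1 ++ List.replicate (counts.getD c 0).toNat c, PySem.Set.add st.2 c)
  else st

def sameOrder_alt (s1 : String) (s2 : String) : String :=
  let counts := s1.toList.foldl
    (fun (d : PySem.Dict Char Int) c => d.insert c (d.getD c 0 + 1)) PySem.Dict.empty
  let st := s2.toList.foldl (stepB counts) ([], PySem.Set.empty)
  let out := s1.toList.foldl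
    (fun (o : List Char) c => if !(PySem.Set.contains st.2 c) then o ++ [c] else o) st.1
  String.mk out

-- ===== PRECONDITION & SPEC =====
def Spec_sameOrder (s1 : String) (s2 : String) (out : String) : Prop := out = sameOrder_alt s1 s2
instance (s1 : String) (s2 : String) (out : String) : Decidable (Spec_sameOrder s1 s2 out) := by unfold Spec_sameOrder; infer_instance

-- ===== CLAIM (what is proved, stated in full; the proofs are below) =====
def Claim_equal_sameOrder : Prop := ∀ (s1 : String) (s2 : String), Dom_sameOrder s1 s2 → Spec_sameOrder s1 s2 (sameOrder s1 s2)

-- ===== LEMMAS AND PROOFS =====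

-- B's count dict: getD is the character count of the folded string
theorem getD_countsFold (l : List Char) (d : PySem.Dict Char Int) (c : Char) :
    (l.foldl (fun (d : PySem.Dict Char Int) c => d.insert c (d.getD c 0 + 1)) d).getD c 0
      = d.getD c 0 + l.count c := by
  induction l generalizing d with
  | nil => simp
  | cons x t ih =>
    simp only [List.foldl_cons, ih, PySem.Dict.getD_insert, List.count_cons]
    by_cases h : c = x
    · subst h
      simp only [BEq.rfl, if_true]
      push_cast
      ring
    · have hbe : (x == c) = false := beq_eq_false_iff_ne.mpr (Ne.symm h)
      simp [h, hbe]

theorem contains_empty (c : Char) : (PySem.Dict.empty : PySem.Dict Char Int).contains c = false := by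
  rfl

theorem contains_countsFold (l : List Char) (d : PySem.Dict Char Int) (c : Char) :
    (l.foldl (fun (d : PySem.Dict Char Int) c => d.insert c (d.getD c 0 + 1)) d).contains c
      = (d.contains c || l.contains c) := by
  induction l generalizing d with
  | nil => simp
  | cons x t ih =>
    simp only [List.foldl_cons, ih, PySem.Dict.contains_insert, List.contains_cons]
    by_cases h : c = x
    · simp [h]
    · have hbe : (c == x) = false := beq_eq_false_iff_ne.mpr h
      simp [hbe]

-- A's inner removal loop, abstracted
def removeStep (c : Char) (l : List Char) : List Char := (PySem.List.remove? l c).getD l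

theorem foldl_const_eq_iterate (c : Char) (xs : List Int) (l : List Char) :
    xs.foldl (fun l _ => (PySem.List.remove? l c).getD l) l = (removeStep c)^[xs.length] l := by
  induction xs generalizing l with
  | nil => rfl
  | cons y ys ih =>
    rw [List.foldl_cons, ih, List.length_cons, Function.iterate_succ_apply]
    rfl

theorem removeStep_cons_ne (c x : Char) (l : List Char) (h : x ≠ c) :
    removeStep c (x :: l) = x :: removeStep c l := by
  unfold removeStep
  rw [PySem.List.remove?_cons_of_ne l h]
  cases PySem.List.remove? l c <;> simp

theorem iterate_removeStep_cons_ne (c x : Char) (n : Nat) (l : List Char) (h : x ≠ c) :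
    (removeStep c)^[n] (x :: l) = x :: (removeStep c)^[n] l := by
  induction n generalizing l with
  | zero => rfl
  | succ n ih => rw [Function.iterate_succ_apply, removeStep_cons_ne c x l h,
      Function.iterate_succ_apply, ih]

-- removing c as many times as it occurs deletes every occurrence of c
theorem iterate_removeStep_count (c : Char) (l : List Char) :
    (removeStep c)^[l.count c] l = l.filter (fun x => x != c) := by
  induction l with
  | nil => simp
  | cons x t ih =>
    by_cases h : x = c
    · subst h
      have hcount : (x :: t).count x = t.count x + 1 := by simp
      rw [hcount, Function.iterate_succ_apply]
      have hstep : removeStep x (x :: t) = t := by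
        unfold removeStep; rw [PySem.List.remove?_cons_self]; rfl
      rw [hstep, ih]
      simp
    · have hbe : (x == c) = false := beq_eq_false_iff_ne.mpr h
      have hcount : (x :: t).count c = t.count c := by
        rw [List.count_cons, hbe]
        simp
      rw [hcount, iterate_removeStep_cons_ne c x _ t h, ih]
      simp [h]

-- main loop invariant: A's s1_chars is s1 minus the consumed characters,
-- and both loops have produced the same output so far
theorem main_invariant (s1L : List Char) (l2 : List Char) :
    ∀ (res : List Char) (consumed : PySem.Set Char),
      (l2.foldl stepA (res, s1L.filter (fun x => !(PySem.Set.contains consumed x)))).1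
        = (l2.foldl (stepB (s1L.foldl (fun (d : PySem.Dict Char Int) c => d.insert c (d.getD c 0 + 1)) PySem.Dict.empty)) (res, consumed)).1
      ∧ (l2.foldl stepA (res, s1L.filter (fun x => !(PySem.Set.contains consumed x)))).2
        = s1L.filter (fun x => !(PySem.Set.contains
            ((l2.foldl (stepB (s1L.foldl (fun (d : PySem.Dict Char Int) c => d.insert c (d.getD c 0 + 1)) PySem.Dict.empty)) (res, consumed)).2) x)) := by
  induction l2 with
  | nil => intro res consumed; exact ⟨rfl, rfl⟩
  | cons c t ih =>
    intro res consumed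
    set counts := s1L.foldl (fun (d : PySem.Dict Char Int) c => d.insert c (d.getD c 0 + 1)) PySem.Dict.empty with hcounts
    by_cases hmem : c ∈ s1L ∧ c ∉ consumed
    · -- both conditions fire
      have hA : c ∈ s1L.filter (fun x => !(PySem.Set.contains consumed x)) := by
        simp only [List.mem_filter]
        refine ⟨hmem.1, ?_⟩
        cases hh : PySem.Set.contains consumed c
        · rfl
        · exact absurd ((PySem.Set.contains_iff consumed c).mp hh) hmem.2
      have hconF : PySem.Set.contains consumed c = false := by
        cases hh : PySem.Set.contains consumed c
        · rfl
        · exact absurd ((PySem.Set.contains_iff consumed c).mp hh) hmem.2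
      have hB : (counts.contains c && !(PySem.Set.contains consumed c)) = true := by
        rw [hcounts, contains_countsFold, contains_empty, hconF]
        simp [hmem.1]
      have hgetD : counts.getD c 0 = (s1L.count c : Int) := by
        have h0 : (PySem.Dict.empty : PySem.Dict Char Int).getD c 0 = 0 := rfl
        rw [hcounts, getD_countsFold, h0]
        simp
      have hcnt : (s1L.filter (fun x => !(PySem.Set.contains consumed x))).count c = s1L.count c :=
        List.count_filter (by simp [hmem.2])
      have hremoved :
          (PySem.List.pyRange 0 (((s1L.filter (fun x => !(PySem.Set.contains consumed x))).count c : Nat) : Int) 1).foldl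
            (fun l _ => (PySem.List.remove? l c).getD l)
            (s1L.filter (fun x => !(PySem.Set.contains consumed x)))
          = s1L.filter (fun x => !(PySem.Set.contains (PySem.Set.add consumed c) x)) := by
        have h1 : (PySem.List.pyRange 0 (((s1L.filter (fun x => !(PySem.Set.contains consumed x))).count c : Nat) : Int) 1).length
            = (s1L.filter (fun x => !(PySem.Set.contains consumed x))).count c := by
          rw [PySem.List.length_pyRange_one]; simp
        calc (PySem.List.pyRange 0 (((s1L.filter (fun x => !(PySem.Set.contains consumed x))).count c : Nat) : Int) 1).foldl
              (fun l _ => (PySem.List.remove? l c).getD l)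
              (s1L.filter (fun x => !(PySem.Set.contains consumed x)))
            = (removeStep c)^[(s1L.filter (fun x => !(PySem.Set.contains consumed x))).count c]
                (s1L.filter (fun x => !(PySem.Set.contains consumed x))) := by
              rw [foldl_const_eq_iterate, h1]
          _ = (s1L.filter (fun x => !(PySem.Set.contains consumed x))).filter (fun x => x != c) := by
              rw [iterate_removeStep_count]
          _ = s1L.filter (fun x => !(PySem.Set.contains (PySem.Set.add consumed c) x)) := by
              rw [List.filter_filter]
              apply List.filter_congr
              intro x _
              by_cases hx : x = c
              · simp [hx, PySem.Set.mem_add]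
              · by_cases hx2 : x ∈ consumed
                · simp [hx, hx2, PySem.Set.mem_add]
                · simp [hx, hx2, PySem.Set.mem_add]
      have hstepA : stepA (res, s1L.filter (fun x => !(PySem.Set.contains consumed x))) c
          = (res ++ List.replicate (s1L.count c) c,
             s1L.filter (fun x => !(PySem.Set.contains (PySem.Set.add consumed c) x))) := by
        unfold stepA
        rw [if_pos hA]
        simp only [hcnt] at hremoved
        simp only [hcnt, hremoved]
      have hstepB : stepB counts (res, consumed) c
          = (res ++ List.replicate (s1L.count c) c, PySem.Set.add consumed c) := by
        unfold stepB
        rw [if_pos hB, hgetD]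
        simp
      rw [List.foldl_cons, List.foldl_cons, hstepA, hstepB]
      exact ih (res ++ List.replicate (s1L.count c) c) (PySem.Set.add consumed c)
    · -- neither condition fires
      have hA : c ∉ s1L.filter (fun x => !(PySem.Set.contains consumed x)) := by
        simp only [List.mem_filter]
        intro h
        refine hmem ⟨h.1, ?_⟩
        intro hc
        rw [(PySem.Set.contains_iff consumed c).mpr hc] at h
        exact absurd h.2 (by simp)
      have hB : (counts.contains c && !(PySem.Set.contains consumed c)) = false := by
        rw [hcounts, contains_countsFold, contains_empty]
        by_cases h1 : c ∈ s1L
        · have h2 : c ∈ consumed := by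
            by_contra h2; exact hmem ⟨h1, h2⟩
          rw [(PySem.Set.contains_iff consumed c).mpr h2]
          simp
        · have : s1L.contains c = false := by
            cases hh : s1L.contains c
            · rfl
            · exact absurd (List.contains_iff_mem.mp hh) h1
          rw [this]
          simp
      have hstepA : stepA (res, s1L.filter (fun x => !(PySem.Set.contains consumed x))) c
          = (res, s1L.filter (fun x => !(PySem.Set.contains consumed x))) := by
        unfold stepA; rw [if_neg hA]
      have hstepB : stepB counts (res, consumed) c = (res, consumed) := by
        unfold stepB; rw [hB]; simp
      rw [List.foldl_cons, List.foldl_cons, hstepA, hstepB]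
      exact ih res consumed

-- ===== VERDICT (by name: the statement is the Claim_ definition above) =====
theorem sameOrder_spec : Claim_equal_sameOrder := by
  intro s1 s2 _
  unfold Spec_sameOrder sameOrder sameOrder_alt
  have hinit : s1.toList.filter (fun x => !(PySem.Set.contains PySem.Set.empty x)) = s1.toList := by
    simp [PySem.Set.empty, PySem.Set.contains]
  have h := main_invariant s1.toList s2.toList [] PySem.Set.empty
  rw [hinit] at h
  simp only []
  rw [PySem.List.foldl_append_if_eq_filter, h.1, h.2]
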